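-- pv_equiv track=rewrite | github.com/moven0831/crescent-rs256-sd-example-app | circuit_setup/scripts/prepare_mdl_prover.py | sha256_padding
-- ===== SOURCE A (Python) =====
-- def sha256_padding(prepad_m):
--     # Apply SHA256 padding to message field
--     msg_length_bits = len(prepad_m) * 8
--     padded_m = prepad_m + [128]
--     while (len(padded_m) + 4)*8 % 512 != 0 :        # The 4 bytes is counting the 32 bits to represent msg_length (added below)
--         padded_m = padded_m + [0]
--
--     msg_len_for_padding = []
--     x = msg_length_bits.to_bytes(4, byteorder='big')
--     for c in range(0,len(x)):
--         msg_len_for_padding.append(int(x[c]))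
--     padded_m = padded_m + msg_len_for_padding
--     return padded_m
-- ===== SOURCE B (Python) =====
-- def sha256_padding(prepad_m):
--     # Closed-form SHA256 padding: compute the zero-byte count arithmetically
--     # instead of appending zeros one at a time in a loop.
--     padded_m = prepad_m + [128]
--     zeros = (60 - len(padded_m)) % 64
--     padded_m += [0] * zeros
--     padded_m += list((len(prepad_m) * 8).to_bytes(4, byteorder='big'))
--     return padded_m
-- ===== Notes on version B (the rewrite author's own statement) =====
-- stated objective: simpler
-- what changed: Replaces the byte-at-a-time while loop (which re-concatenates the whole list up to 63 times) with a closed-form modular count of zero bytes and a single extend, plus a direct to_bytes conversion.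
import Mathlib
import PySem

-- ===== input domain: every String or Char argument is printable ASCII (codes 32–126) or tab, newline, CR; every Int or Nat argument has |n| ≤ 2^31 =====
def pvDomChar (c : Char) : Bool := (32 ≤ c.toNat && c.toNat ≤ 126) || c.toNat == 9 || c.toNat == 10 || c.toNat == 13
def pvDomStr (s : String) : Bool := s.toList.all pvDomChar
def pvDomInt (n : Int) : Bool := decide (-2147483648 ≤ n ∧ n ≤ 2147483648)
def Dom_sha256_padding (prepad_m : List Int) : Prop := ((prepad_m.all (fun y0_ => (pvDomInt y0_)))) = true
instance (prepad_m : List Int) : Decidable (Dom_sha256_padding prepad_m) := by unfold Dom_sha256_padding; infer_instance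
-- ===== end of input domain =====

-- B replaces A's one-zero-at-a-time while loop with a closed-form modular count of
-- zero bytes and a single extend (objective: simpler).


-- ===== PORT A =====
-- the while loop; fuel 64 only makes the recursion total (the condition fails within 64 steps)
def padZerosA : Nat → List Int → List Int
  | 0, l => l
  | fuel+1, l => if ((l.length + 4) * 8) % 512 ≠ 0 then padZerosA fuel (l ++ [0]) else l

-- int(x[c]) where x = msg_length_bits.to_bytes(4, 'big'): the c-th big-endian byte
def byteA (n c : Int) : Int := PySem.Int.mod (PySem.Int.floordiv n ((256 : Int) ^ (3 - c).toNat)) 256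

def sha256_padding (prepad_m : List Int) : List Int :=
  let msg_length_bits : Int := (prepad_m.length : Int) * 8
  let padded_m := padZerosA 64 (prepad_m ++ [128])
  let msg_len_for_padding :=
    (PySem.List.pyRange 0 4 1).foldl (fun acc c => acc ++ [byteA msg_length_bits c]) []
  padded_m ++ msg_len_for_padding

-- ===== PORT B =====
def sha256_padding_alt (prepad_m : List Int) : List Int :=
  let padded_m := prepad_m ++ [128]
  let zeros := PySem.Int.mod (60 - (padded_m.length : Int)) 64
  let bits : Int := (prepad_m.length : Int) * 8
  padded_m ++ List.replicate zeros.toNat 0 ++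
    [PySem.Int.mod (PySem.Int.floordiv bits 16777216) 256,
     PySem.Int.mod (PySem.Int.floordiv bits 65536) 256,
     PySem.Int.mod (PySem.Int.floordiv bits 256) 256,
     PySem.Int.mod bits 256]

-- ===== PRECONDITION & SPEC =====
def Spec_sha256_padding (prepad_m : List Int) (out : List Int) : Prop := out = sha256_padding_alt prepad_m
instance (prepad_m : List Int) (out : List Int) : Decidable (Spec_sha256_padding prepad_m out) := by unfold Spec_sha256_padding; infer_instance

-- ===== CLAIM (what is proved, stated in full; the proofs are below) =====
def Claim_equal_sha256_padding : Prop := ∀ (prepad_m : List Int), Dom_sha256_padding prepad_m → Spec_sha256_padding prepad_m (sha256_padding prepad_m)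

-- ===== LEMMAS AND PROOFS =====

-- number of zero bytes the while loop appends, as a function of the current length
def zN (n : Nat) : Nat := (124 - n % 64) % 64

theorem padZerosA_eq (fuel : Nat) (l : List Int) (h : zN l.length < fuel) :
    padZerosA fuel l = l ++ List.replicate (zN l.length) 0 := by
  induction fuel generalizing l with
  | zero => omega
  | succ fuel ih =>
    unfold padZerosA
    by_cases hc : ((l.length + 4) * 8) % 512 ≠ 0
    · rw [if_pos hc]
      have hz1 : 1 ≤ zN l.length := by unfold zN at *; omega
      have hlen : (l ++ [0]).length = l.length + 1 := by simp
      have hz : zN (l.length + 1) = zN l.length - 1 := by unfold zN at *; omega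
      rw [ih (l ++ [0]) (by rw [hlen, hz]; omega), hlen, hz]
      have : zN l.length = (zN l.length - 1) + 1 := by omega
      rw [this, List.replicate_succ, List.append_assoc]
      simp
    · rw [if_neg hc]
      have hz : zN l.length = 0 := by unfold zN at *; omega
      simp [hz]

theorem zeros_toNat (n : Nat) :
    (PySem.Int.mod (60 - ((n + 1 : Nat) : Int)) 64).toNat = zN (n + 1) := by
  rw [PySem.Int.mod_eq_emod_of_pos (by norm_num : (0:Int) < 64)]
  unfold zN
  omega

theorem sha256_padding_eq_alt (p : List Int) : sha256_padding p = sha256_padding_alt p := by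
  unfold sha256_padding sha256_padding_alt
  have hr : PySem.List.pyRange 0 4 1 = [0, 1, 2, 3] := by decide
  rw [hr]
  simp only [List.foldl, List.nil_append]
  rw [padZerosA_eq 64 (p ++ [128]) (by unfold zN; omega)]
  have hlen : (p ++ [128]).length = p.length + 1 := by simp
  rw [hlen, zeros_toNat p.length]
  unfold byteA
  have h0 : ((3 : Int) - 0).toNat = 3 := by decide
  have h1 : ((3 : Int) - 1).toNat = 2 := by decide
  have h2 : ((3 : Int) - 2).toNat = 1 := by decide
  have h3 : ((3 : Int) - 3).toNat = 0 := by decide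
  rw [h0, h1, h2, h3]
  have hfd1 : PySem.Int.floordiv ((p.length : Int) * 8) ((256 : Int) ^ 0) = (p.length : Int) * 8 := by
    rw [PySem.Int.floordiv_eq_ediv_of_pos (by norm_num : (0:Int) < (256:Int) ^ 0)]; norm_num
  rw [hfd1]
  norm_num [List.append_assoc, hlen]

-- ===== VERDICT (by name: the statement is the Claim_ definition above) =====
theorem sha256_padding_spec : Claim_equal_sha256_padding := by
  intro p _
  unfold Spec_sha256_padding
  exact sha256_padding_eq_alt p
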